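-- pv_equiv track=rewrite | github.com/ysg23/MLBPredicts | pipeline/db/database.py | _adapt_paramstyle
-- ===== SOURCE A (Python) =====
-- def _adapt_paramstyle(sql: str, backend: str) -> str:
--     if backend != "postgres" or "?" not in sql:
--         return sql
--
--     converted: list[str] = []
--     in_single = False
--     in_double = False
--
--     for ch in sql:
--         if ch == "'" and not in_double:
--             in_single = not in_single
--             converted.append(ch)
--             continue
--         if ch == '"' and not in_single:
--             in_double = not in_double
--             converted.append(ch)
--             continue
--         if ch == "?" and not in_single and not in_double:
--             converted.append("%s")
--             continue
--         converted.append(ch)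
--     return "".join(converted)
-- ===== SOURCE B (Python) =====
-- def _adapt_paramstyle(sql: str, backend: str) -> str:
--     if backend != "postgres" or "?" not in sql:
--         return sql
--     out: list[str] = []
--     i = 0
--     n = len(sql)
--     while i < n:
--         ch = sql[i]
--         if ch == "'" or ch == '"':
--             j = sql.find(ch, i + 1)
--             if j == -1:
--                 out.append(sql[i:])
--                 i = n
--             else:
--                 out.append(sql[i:j + 1])
--                 i = j + 1
--         elif ch == "?":
--             out.append("%s")
--             i += 1
--         else:
--             out.append(ch)
--             i += 1
--     return "".join(out)
-- ===== Notes on version B (the rewrite author's own statement) =====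
-- stated objective: alternative
-- what changed: Replaces the per-character state machine with two in-quote flags by an index-jumping segment scanner that, on a quote, finds the matching closing quote with str.find and copies the whole quoted segment in one slice.
import Mathlib
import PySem

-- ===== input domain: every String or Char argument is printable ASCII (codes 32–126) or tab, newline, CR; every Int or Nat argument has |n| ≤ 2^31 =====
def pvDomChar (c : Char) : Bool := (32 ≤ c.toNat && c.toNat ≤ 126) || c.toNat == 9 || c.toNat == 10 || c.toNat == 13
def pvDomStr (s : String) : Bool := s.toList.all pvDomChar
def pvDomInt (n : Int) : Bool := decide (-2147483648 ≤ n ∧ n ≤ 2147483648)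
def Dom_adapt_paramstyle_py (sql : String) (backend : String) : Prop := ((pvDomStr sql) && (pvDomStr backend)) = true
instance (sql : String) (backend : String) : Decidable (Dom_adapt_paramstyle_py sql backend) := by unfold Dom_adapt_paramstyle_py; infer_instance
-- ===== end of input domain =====

-- B replaces A's per-character quote-flag state machine with a segment scanner that
-- copies each whole quoted segment in one jump (str.find); objective: alternative.


-- ===== PORT A =====
-- the for-loop over the characters with the two in-quote flags; '?' becomes "%s"
def adaptLoopA : List Char → Bool → Bool → List Char
  | [], _, _ => []
  | ch :: rest, in_single, in_double =>
    if ch = '\'' ∧ ¬ in_double = true then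
      ch :: adaptLoopA rest (!in_single) in_double
    else if ch = '"' ∧ ¬ in_single = true then
      ch :: adaptLoopA rest in_single (!in_double)
    else if ch = '?' ∧ ¬ in_single = true ∧ ¬ in_double = true then
      '%' :: 's' :: adaptLoopA rest in_single in_double
    else
      ch :: adaptLoopA rest in_single in_double

def adapt_paramstyle_py (sql : String) (backend : String) : String :=
  if backend ≠ "postgres" ∨ ¬ PySem.Str.isIn "?" sql then sql
  else String.ofList (adaptLoopA sql.toList false false)

-- ===== PORT B =====
-- the while-loop over positions: on a quote, jump to its closing quote (sql.find)
-- and copy the whole segment; takeWhile/dropWhile render the find-and-slice step.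
def adaptLoopB : List Char → List Char
  | [] => []
  | c :: rest =>
    if c = '\'' ∨ c = '"' then
      match h : rest.dropWhile (· ≠ c) with
      | [] => c :: rest.takeWhile (· ≠ c)
      | q :: r => c :: (rest.takeWhile (· ≠ c) ++ q :: adaptLoopB r)
    else if c = '?' then '%' :: 's' :: adaptLoopB rest
    else c :: adaptLoopB rest
  termination_by l => l.length
  decreasing_by
    · have h1 : (rest.dropWhile (· ≠ c)).length ≤ rest.length := List.length_dropWhile_le _ _
      rw [h] at h1
      simp at h1 ⊢
      omega
    · simp
    · simp

def adapt_paramstyle_py_alt (sql : String) (backend : String) : String :=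
  if backend ≠ "postgres" ∨ ¬ PySem.Str.isIn "?" sql then sql
  else String.ofList (adaptLoopB sql.toList)

-- ===== PRECONDITION & SPEC =====
def Spec_adapt_paramstyle_py (sql : String) (backend : String) (out : String) : Prop := out = adapt_paramstyle_py_alt sql backend
instance (sql : String) (backend : String) (out : String) : Decidable (Spec_adapt_paramstyle_py sql backend out) := by unfold Spec_adapt_paramstyle_py; infer_instance

-- ===== CLAIM (what is proved, stated in full; the proofs are below) =====
def Claim_equal_adapt_paramstyle_py : Prop := ∀ (sql : String) (backend : String), Dom_adapt_paramstyle_py sql backend → Spec_adapt_paramstyle_py sql backend (adapt_paramstyle_py sql backend)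

-- ===== LEMMAS AND PROOFS =====

-- inside a single-quoted segment A copies characters verbatim until the closing quote
lemma adaptLoopA_single (l : List Char) :
    adaptLoopA l true false =
      l.takeWhile (· ≠ '\'') ++
        (match l.dropWhile (· ≠ '\'') with
         | [] => []
         | q :: r => q :: adaptLoopA r false false) := by
  induction l with
  | nil => simp [adaptLoopA]
  | cons c rest ih =>
    by_cases hc : c = '\''
    · subst hc
      simp [adaptLoopA, List.takeWhile, List.dropWhile]
    · simp only [adaptLoopA, hc, false_and, if_false]
      rw [ih]
      simp [List.takeWhile, List.dropWhile, hc]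

-- inside a double-quoted segment A copies characters verbatim until the closing quote
lemma adaptLoopA_double (l : List Char) :
    adaptLoopA l false true =
      l.takeWhile (· ≠ '"') ++
        (match l.dropWhile (· ≠ '"') with
         | [] => []
         | q :: r => q :: adaptLoopA r false false) := by
  induction l with
  | nil => simp [adaptLoopA]
  | cons c rest ih =>
    by_cases hc : c = '"'
    · subst hc
      simp [adaptLoopA, List.takeWhile, List.dropWhile]
    · simp only [adaptLoopA, if_false, hc, false_and]
      rw [ih]
      simp [List.takeWhile, List.dropWhile, hc]

-- unfolding equations for the segment scanner at a quote character
lemma adaptLoopB_quote_nil (c : Char) (rest : List Char)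
    (hq : c = '\'' ∨ c = '"') (h : rest.dropWhile (· ≠ c) = []) :
    adaptLoopB (c :: rest) = c :: rest.takeWhile (· ≠ c) := by
  rw [adaptLoopB, if_pos hq]
  split
  · rfl
  · next q r heq => rw [h] at heq; cases heq

lemma adaptLoopB_quote_cons (c q : Char) (rest r : List Char)
    (hq : c = '\'' ∨ c = '"') (h : rest.dropWhile (· ≠ c) = q :: r) :
    adaptLoopB (c :: rest) = c :: (rest.takeWhile (· ≠ c) ++ q :: adaptLoopB r) := by
  rw [adaptLoopB, if_pos hq]
  split
  · next heq => rw [h] at heq; cases heq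
  · next q' r' heq =>
      rw [h] at heq
      cases heq
      rfl

-- the flag machine started in the neutral state equals the segment scanner
lemma adaptLoopA_eq_B (l : List Char) : adaptLoopA l false false = adaptLoopB l := by
  induction l using adaptLoopB.induct with
  | case1 => simp [adaptLoopA, adaptLoopB]
  | case2 c rest hq hdrop =>
    rw [adaptLoopB_quote_nil c rest hq hdrop]
    rcases hq with hq | hq
    all_goals subst hq
    · rw [show adaptLoopA ('\'' :: rest) false false
            = '\'' :: adaptLoopA rest true false by simp [adaptLoopA]]
      rw [adaptLoopA_single, hdrop]
      simp
    · rw [show adaptLoopA ('"' :: rest) false false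
            = '"' :: adaptLoopA rest false true by simp [adaptLoopA]]
      rw [adaptLoopA_double, hdrop]
      simp
  | case3 c rest hq q r hdrop ih =>
    rw [adaptLoopB_quote_cons c q rest r hq hdrop]
    rcases hq with hq | hq
    all_goals subst hq
    · rw [show adaptLoopA ('\'' :: rest) false false
            = '\'' :: adaptLoopA rest true false by simp [adaptLoopA]]
      rw [adaptLoopA_single, hdrop]
      simp [ih]
    · rw [show adaptLoopA ('"' :: rest) false false
            = '"' :: adaptLoopA rest false true by simp [adaptLoopA]]
      rw [adaptLoopA_double, hdrop]
      simp [ih]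
  | case4 rest hq ih =>
    rw [adaptLoopB]
    simp only [hq, if_false, if_true]
    simp [adaptLoopA, ih]
  | case5 c rest hq hc ih =>
    have hq1 : ¬ c = '\'' := fun h => hq (Or.inl h)
    have hq2 : ¬ c = '"' := fun h => hq (Or.inr h)
    rw [adaptLoopB]
    simp only [hq, hc, if_false]
    simp [adaptLoopA, hq1, hq2, hc, ih]

-- ===== VERDICT (by name: the statement is the Claim_ definition above) =====
theorem adapt_paramstyle_py_spec : Claim_equal_adapt_paramstyle_py := by
  intro sql backend _
  unfold Spec_adapt_paramstyle_py adapt_paramstyle_py adapt_paramstyle_py_alt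
  split
  · rfl
  · rw [adaptLoopA_eq_B]
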